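-- pv_equiv track=rewrite | github.com/xmah-p/ics-labs | fsm.py | fsm
-- ===== SOURCE A (Python) =====
-- one = {0: 2, 1: 3, 2: 4, 3: 1, 4: 0, 5: 0, 6: 0}
--
-- zero = {0: 0, 1: 5, 2: 1, 3: 2, 4: 6, 5: 4, 6: 3}
--
-- def fsm(n):
--     # convert n to its binary representation
--     ops = bin(n)[2:]
--
--     def apply(state, ops):
--         for op in ops:
--             if op == "1":
--                 state = one[state]
--             else:
--                 state = zero[state]
--         return state
--
--     s0 = apply(0, ops)
--     for i in range(1, 7):
--         if apply(i, ops) != s0: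
--             return False
--     return True
-- ===== SOURCE B (Python) =====
-- one = {0: 2, 1: 3, 2: 4, 3: 1, 4: 0, 5: 0, 6: 0}
--
-- zero = {0: 0, 1: 5, 2: 1, 3: 2, 4: 6, 5: 4, 6: 3}
--
-- def fsm(n):
--     # single pass: carry all 7 states through the digit string at once
--     states = list(range(7))
--     for op in bin(n)[2:]:
--         if op == "1":
--             states = [one[s] for s in states]
--         else:
--             states = [zero[s] for s in states]
--     return all(s == states[0] for s in states)
-- ===== Notes on version B (the rewrite author's own statement) =====
-- stated objective: alternative
-- what changed: Replaces A's seven separate scans of the digit string (one per starting state, an inner apply loop under an early-return outer loop) with a single pass that carries the whole state vector through the digits and then checks all entries are equal.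
import Mathlib
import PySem

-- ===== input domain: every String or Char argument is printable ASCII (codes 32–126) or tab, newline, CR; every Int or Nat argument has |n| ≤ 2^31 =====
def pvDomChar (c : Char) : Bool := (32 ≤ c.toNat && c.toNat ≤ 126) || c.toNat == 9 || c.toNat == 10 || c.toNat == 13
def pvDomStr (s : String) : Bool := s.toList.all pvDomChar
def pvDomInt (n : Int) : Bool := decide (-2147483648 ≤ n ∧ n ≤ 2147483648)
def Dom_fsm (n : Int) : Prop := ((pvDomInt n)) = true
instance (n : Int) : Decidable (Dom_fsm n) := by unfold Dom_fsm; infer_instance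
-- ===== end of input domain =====

-- B replaces A's seven scans of the digit string (one per start state) with one pass over a 7-state vector; same cost class, single traversal.

-- module-level constants shared by both Pythons
def oneD : PySem.Dict Int Int :=
  PySem.Dict.ofList [(0, 2), (1, 3), (2, 4), (3, 1), (4, 0), (5, 0), (6, 0)]

def zeroD : PySem.Dict Int Int :=
  PySem.Dict.ofList [(0, 0), (1, 5), (2, 1), (3, 2), (4, 6), (5, 4), (6, 3)]

-- bin(n)[2:] as a list of characters (shared source line of both programs)
def opsOf (n : Int) : List Char :=
  PySem.List.slice (PySem.Int.pyBin n).toList (some 2) none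

-- ===== PORT A =====
-- inner helper 'apply(state, ops)' of A (one[state]/zero[state]; keys 0..6 always present, getD default unreachable)
def applyA (state : Int) (ops : List Char) : Int :=
  ops.foldl (fun s op => if op = '1' then oneD.getD s 0 else zeroD.getD s 0) state

-- A's 'for i in range(1, 7): if apply(i, ops) != s0: return False' early-return loop
def fsmLoop (ops : List Char) (s0 : Int) : List Int → Bool
  | [] => true
  | i :: rest => if applyA i ops ≠ s0 then false else fsmLoop ops s0 rest

def fsm (n : Int) : Bool :=
  let ops := opsOf n
  let s0 := applyA 0 ops
  fsmLoop ops s0 (PySem.List.pyRange 1 7 1)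

-- ===== PORT B =====
def fsm_alt (n : Int) : Bool :=
  let states := (List.range 7).map (Int.ofNat)
  let final := (opsOf n).foldl
    (fun sts op =>
      if op = '1' then sts.map (fun s => oneD.getD s 0)
      else sts.map (fun s => zeroD.getD s 0)) states
  final.all (fun s => s == final.headD 0)

-- ===== PRECONDITION & SPEC =====
def Spec_fsm (n : Int) (out : Bool) : Prop := out = fsm_alt n
instance (n : Int) (out : Bool) : Decidable (Spec_fsm n out) := by unfold Spec_fsm; infer_instance

-- ===== CLAIM (what is proved, stated in full; the proofs are below) =====
def Claim_equal_fsm : Prop := ∀ (n : Int), Dom_fsm n → Spec_fsm n (fsm n)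

-- ===== LEMMAS AND PROOFS =====

-- B's vector fold is the elementwise map of A's single-state fold
theorem foldl_vec_eq_map (ops : List Char) (sts : List Int) :
    ops.foldl
      (fun sts op =>
        if op = '1' then sts.map (fun s => oneD.getD s 0)
        else sts.map (fun s => zeroD.getD s 0)) sts
      = sts.map (fun s => applyA s ops) := by
  induction ops generalizing sts with
  | nil => simp [applyA]
  | cons op rest ih =>
    simp only [List.foldl_cons, ih, applyA]
    by_cases h : op = '1' <;> simp [h, Function.comp]

theorem fsm_eq_alt (n : Int) : fsm n = fsm_alt n := by
  have hr : PySem.List.pyRange 1 7 1 = [1, 2, 3, 4, 5, 6] := by decide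
  have hs : (List.range 7).map Int.ofNat = ([0, 1, 2, 3, 4, 5, 6] : List Int) := by decide
  unfold fsm fsm_alt
  simp only [hr, hs, foldl_vec_eq_map, List.map_cons, List.map_nil, List.headD,
    List.all_cons, List.all_nil, fsmLoop]
  generalize applyA 0 (opsOf n) = f0
  generalize applyA 1 (opsOf n) = f1
  generalize applyA 2 (opsOf n) = f2
  generalize applyA 3 (opsOf n) = f3
  generalize applyA 4 (opsOf n) = f4
  generalize applyA 5 (opsOf n) = f5
  generalize applyA 6 (opsOf n) = f6
  split_ifs <;> simp_all

-- ===== VERDICT (by name: the statement is the Claim_ definition above) =====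
theorem fsm_spec : Claim_equal_fsm := by
  intro n _
  exact fsm_eq_alt n
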